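-- pv_equiv track=rewrite | github.com/M0nero/disser | bio/pipeline/prelabel.py | build_len_hist
-- ===== SOURCE A (Python) =====
-- from typing import Any, Dict, List, Optional, Sequence, Tuple
--
-- def build_len_hist(lengths: List[int]) -> Dict[str, int]:
--     bins = [1, 8, 16, 32, 64, 128, 256, 512, 1024]
--     hist: Dict[str, int] = {}
--     for i in range(len(bins) - 1):
--         lo = bins[i]
--         hi = bins[i + 1] - 1
--         key = f"{lo}-{hi}"
--         hist[key] = sum(1 for x in lengths if lo <= x <= hi)
--     hist[f"{bins[-1]}+"] = sum(1 for x in lengths if x >= bins[-1])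
--     return hist
-- ===== SOURCE B (Python) =====
-- def _bin_index(x):
--     if x < 1:
--         return None
--     if x <= 7:
--         return 0
--     if x <= 15:
--         return 1
--     if x <= 31:
--         return 2
--     if x <= 63:
--         return 3
--     if x <= 127:
--         return 4
--     if x <= 255:
--         return 5
--     if x <= 511:
--         return 6
--     if x <= 1023:
--         return 7
--     return 8
--
--
-- def build_len_hist(lengths):
--     bins = [1, 8, 16, 32, 64, 128, 256, 512, 1024]
--     counts = [0] * 9
--     for x in lengths:
--         i = _bin_index(x)
--         if i is not None:
--             counts[i] += 1
--     hist = {}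
--     for i in range(8):
--         hist[f"{bins[i]}-{bins[i + 1] - 1}"] = counts[i]
--     hist["1024+"] = counts[8]
--     return hist
-- ===== Notes on version B (the rewrite author's own statement) =====
-- stated objective: faster
-- what changed: A makes nine separate scans of the list (one generator-sum per bin); B classifies each element once into a bin index in a single pass over the list and then assembles the histogram from the counter array.
import Mathlib
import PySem

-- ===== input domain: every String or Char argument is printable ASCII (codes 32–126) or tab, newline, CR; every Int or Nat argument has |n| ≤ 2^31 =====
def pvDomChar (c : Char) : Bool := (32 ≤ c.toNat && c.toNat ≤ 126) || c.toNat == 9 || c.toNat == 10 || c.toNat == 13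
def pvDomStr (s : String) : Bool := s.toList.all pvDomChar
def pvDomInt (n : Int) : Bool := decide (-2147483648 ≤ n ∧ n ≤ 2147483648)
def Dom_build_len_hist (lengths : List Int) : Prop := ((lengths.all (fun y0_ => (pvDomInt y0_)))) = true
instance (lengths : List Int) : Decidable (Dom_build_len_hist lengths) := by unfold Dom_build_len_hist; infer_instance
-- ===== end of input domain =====

-- B replaces A's nine generator-sum scans of the list by a single pass that
-- classifies each element into its bin index and increments a counter array.

-- ===== PORT A =====
def build_len_hist (lengths : List Int) : List (String × Int) :=
  let bins : List Int := [1, 8, 16, 32, 64, 128, 256, 512, 1024]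
  let hist : PySem.Dict String Int := PySem.Dict.empty
  let hist := (PySem.List.pyRange 0 ((bins.length : Int) - 1) 1).foldl (fun hist i =>
    let lo := PySem.List.pyGetD bins i 0
    let hi := PySem.List.pyGetD bins (i + 1) 0 - 1
    let key := PySem.Int.toStr lo ++ "-" ++ PySem.Int.toStr hi
    hist.insert key (lengths.foldl (fun acc x => if lo ≤ x ∧ x ≤ hi then acc + 1 else acc) 0)) hist
  (hist.insert (PySem.Int.toStr (PySem.List.pyGetD bins (-1) 0) ++ "+")
    (lengths.foldl (fun acc x => if x ≥ PySem.List.pyGetD bins (-1) 0 then acc + 1 else acc) 0)).items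

-- ===== PORT B =====
def pvBinIndex (x : Int) : Option Nat :=
  if x < 1 then none
  else if x ≤ 7 then some 0
  else if x ≤ 15 then some 1
  else if x ≤ 31 then some 2
  else if x ≤ 63 then some 3
  else if x ≤ 127 then some 4
  else if x ≤ 255 then some 5
  else if x ≤ 511 then some 6
  else if x ≤ 1023 then some 7
  else some 8

-- `counts[i] += 1` on an in-range index i is List.modify i (· + 1); exact since pvBinIndex yields 0..8
def pvStep (counts : List Int) (x : Int) : List Int :=
  match pvBinIndex x with
  | none => counts
  | some i => counts.modify i (· + 1)

def build_len_hist_alt (lengths : List Int) : List (String × Int) :=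
  let bins : List Int := [1, 8, 16, 32, 64, 128, 256, 512, 1024]
  let counts := lengths.foldl pvStep (List.replicate 9 (0 : Int))
  let hist : PySem.Dict String Int := PySem.Dict.empty
  let hist := (PySem.List.pyRange 0 8 1).foldl (fun hist i =>
    hist.insert (PySem.Int.toStr (PySem.List.pyGetD bins i 0) ++ "-" ++
                 PySem.Int.toStr (PySem.List.pyGetD bins (i + 1) 0 - 1))
                (PySem.List.pyGetD counts i 0)) hist
  (hist.insert "1024+" (PySem.List.pyGetD counts 8 0)).items

-- ===== PRECONDITION & SPEC =====
def Spec_build_len_hist (lengths : List Int) (out : List (String × Int)) : Prop := out = build_len_hist_alt lengths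
instance (lengths : List Int) (out : List (String × Int)) : Decidable (Spec_build_len_hist lengths out) := by unfold Spec_build_len_hist; infer_instance

-- ===== CLAIM (what is proved, stated in full; the proofs are below) =====
def Claim_equal_build_len_hist : Prop := ∀ (lengths : List Int), Dom_build_len_hist lengths → Spec_build_len_hist lengths (build_len_hist lengths)

-- ===== LEMMAS AND PROOFS =====

def pvCnt (lo hi : Int) (l : List Int) : Int :=
  l.foldl (fun acc x => if lo ≤ x ∧ x ≤ hi then acc + 1 else acc) 0

def pvCntGe (l : List Int) : Int :=
  l.foldl (fun acc x => if x ≥ (1024 : Int) then acc + 1 else acc) 0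

def pvC (l : List Int) (j : Nat) : Int :=
  PySem.List.pyGetD (l.foldl pvStep (List.replicate 9 (0 : Int))) (j : Int) 0

set_option maxHeartbeats 2000000 in
theorem A_unfold (l : List Int) : build_len_hist l =
    [("1-7", pvCnt 1 7 l), ("8-15", pvCnt 8 15 l), ("16-31", pvCnt 16 31 l),
     ("32-63", pvCnt 32 63 l), ("64-127", pvCnt 64 127 l), ("128-255", pvCnt 128 255 l),
     ("256-511", pvCnt 256 511 l), ("512-1023", pvCnt 512 1023 l), ("1024+", pvCntGe l)] := rfl

set_option maxHeartbeats 2000000 in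
theorem B_unfold (l : List Int) : build_len_hist_alt l =
    [("1-7", pvC l 0), ("8-15", pvC l 1), ("16-31", pvC l 2),
     ("32-63", pvC l 3), ("64-127", pvC l 4), ("128-255", pvC l 5),
     ("256-511", pvC l 6), ("512-1023", pvC l 7), ("1024+", pvC l 8)] := rfl

theorem pvStep_length (c : List Int) (x : Int) : (pvStep c x).length = c.length := by
  unfold pvStep
  cases pvBinIndex x <;> simp

theorem pvStep_getD (c : List Int) (x : Int) (j : Nat) (hj : j < c.length) :
    (pvStep c x).getD j 0 = c.getD j 0 + (if pvBinIndex x == some j then 1 else 0) := by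
  unfold pvStep
  cases h : pvBinIndex x with
  | none => simp
  | some i =>
      by_cases hij : i = j
      · subst hij
        simp [List.getD_eq_getElem?_getD, List.getElem?_eq_getElem hj]
      · simp [List.getD_eq_getElem?_getD, hij, List.getElem?_eq_getElem hj]

theorem pvFold_getD (l : List Int) (c : List Int) (j : Nat) (hj : j < c.length) :
    (l.foldl pvStep c).getD j 0 =
      c.getD j 0 + ((l.countP (fun x => pvBinIndex x == some j) : Nat) : Int) := by
  induction l generalizing c with
  | nil => simp
  | cons x t ih =>
      rw [List.foldl_cons, ih (pvStep c x) (by rw [pvStep_length]; exact hj),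
          pvStep_getD c x j hj, List.countP_cons]
      by_cases h : pvBinIndex x == some j
      · simp [h]; ring
      · simp [h]

theorem pvC_eq_countP (l : List Int) (j : Nat) (hj : j < 9) :
    pvC l j = ((l.countP (fun x => pvBinIndex x == some j) : Nat) : Int) := by
  unfold pvC
  rw [PySem.List.pyGetD_natCast, pvFold_getD l _ j (by simpa using hj),
      List.getD_eq_getElem?_getD, List.getElem?_replicate]
  simp [hj]

theorem pvCnt_eq_countP (lo hi : Int) (l : List Int) :
    pvCnt lo hi l = ((l.countP (fun x => decide (lo ≤ x ∧ x ≤ hi)) : Nat) : Int) := by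
  unfold pvCnt
  induction l using List.reverseRecOn with
  | nil => simp
  | append_singleton t x ih =>
      rw [List.foldl_append, List.countP_append]
      simp only [List.foldl_cons, List.foldl_nil, List.countP_cons, List.countP_nil]
      by_cases h : lo ≤ x ∧ x ≤ hi <;> simp [h, ih]

theorem pvCntGe_eq_countP (l : List Int) :
    pvCntGe l = ((l.countP (fun x => decide ((1024 : Int) ≤ x)) : Nat) : Int) := by
  unfold pvCntGe
  induction l using List.reverseRecOn with
  | nil => simp
  | append_singleton t x ih =>
      rw [List.foldl_append, List.countP_append]
      simp only [List.foldl_cons, List.foldl_nil, List.countP_cons, List.countP_nil]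
      by_cases h : (1024 : Int) ≤ x <;> simp [ge_iff_le, h, ih]

-- ===== VERDICT (by name: the statement is the Claim_ definition above) =====
set_option maxHeartbeats 2000000 in
theorem build_len_hist_spec : Claim_equal_build_len_hist := by
  intro l _
  show build_len_hist l = build_len_hist_alt l
  rw [A_unfold, B_unfold]
  have key : ∀ (j : Nat) (lo hi : Int),
      (∀ x : Int, (pvBinIndex x == some j) = decide (lo ≤ x ∧ x ≤ hi)) → j < 9 →
      pvCnt lo hi l = pvC l j := by
    intro j lo hi hspec hj
    rw [pvCnt_eq_countP, pvC_eq_countP l j hj]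
    congr 1
    exact List.countP_congr (fun x _ => by rw [hspec x])
  have h8 : pvCntGe l = pvC l 8 := by
    rw [pvCntGe_eq_countP, pvC_eq_countP l 8 (by omega)]
    congr 1
    exact List.countP_congr (fun x _ => by
      unfold pvBinIndex; split_ifs <;> simp <;> omega)
  rw [key 0 1 7 (fun x => by unfold pvBinIndex; split_ifs <;> simp <;> omega) (by omega),
      key 1 8 15 (fun x => by unfold pvBinIndex; split_ifs <;> simp <;> omega) (by omega),
      key 2 16 31 (fun x => by unfold pvBinIndex; split_ifs <;> simp <;> omega) (by omega),
      key 3 32 63 (fun x => by unfold pvBinIndex; split_ifs <;> simp <;> omega) (by omega),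
      key 4 64 127 (fun x => by unfold pvBinIndex; split_ifs <;> simp <;> omega) (by omega),
      key 5 128 255 (fun x => by unfold pvBinIndex; split_ifs <;> simp <;> omega) (by omega),
      key 6 256 511 (fun x => by unfold pvBinIndex; split_ifs <;> simp <;> omega) (by omega),
      key 7 512 1023 (fun x => by unfold pvBinIndex; split_ifs <;> simp <;> omega) (by omega),
      h8]
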